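-- pv_equiv track=rewrite | github.com/AndreGosselink/InspectorCell | components/dataframework/dataframework/processing/misc.py | _patterfy
-- ===== SOURCE A (Python) =====
-- def _patterfy(string):
--     """Removes all regex critical and all unicode characters
--     """
--     #TODO maybe unicode replaced by dots as well
--     # removing regex critical characters
--
--     string = string.strip()
--
--     split_litdot = []
--     for part in string.split('.'):
--         for char in r'\|()[]/<>_-':
--             part = part.replace(char, '.')
--         split_litdot.append(part)
--
--     string = r'\.'.join(split_litdot)
--
--     # assuming all non assci is some greek abbr. with a-z
--     asciistring = str(string).encode('ascii', 'replace').decode()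
--     asciistring = asciistring.replace('?', '[a-z]')
--     return asciistring
-- ===== SOURCE B (Python) =====
-- def _patterfy(string):
--     """Single left-to-right pass: map each character of string.strip() to its
--     regex piece and join, instead of split/replace-loops/join plus encode."""
--     specials = set('\\|()[]/<>_-')
--     pieces = []
--     for c in string.strip():
--         if c == '.':
--             pieces.append('\\.')
--         elif c in specials:
--             pieces.append('.')
--         elif c == '?' or ord(c) > 127:
--             pieces.append('[a-z]')
--         else:
--             pieces.append(c)
--     return ''.join(pieces)
-- ===== Notes on version B (the rewrite author's own statement) =====
-- stated objective: simpler
-- what changed: Replaces the split-on-dot / per-part replace-loop / join / ascii-encode / question-mark-replace pipeline by a single left-to-right pass that maps each character of string.strip() to its regex piece and joins the pieces.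
import Mathlib
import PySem

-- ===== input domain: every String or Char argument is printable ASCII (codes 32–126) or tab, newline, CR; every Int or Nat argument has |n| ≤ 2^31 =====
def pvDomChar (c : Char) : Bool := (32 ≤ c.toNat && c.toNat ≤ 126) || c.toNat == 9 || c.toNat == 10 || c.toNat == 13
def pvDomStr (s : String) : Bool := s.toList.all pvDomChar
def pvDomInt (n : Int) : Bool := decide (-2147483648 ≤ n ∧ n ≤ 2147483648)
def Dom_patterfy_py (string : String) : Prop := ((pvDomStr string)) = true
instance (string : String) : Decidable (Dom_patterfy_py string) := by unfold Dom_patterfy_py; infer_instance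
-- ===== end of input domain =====

-- B replaces A's split/per-part-replace-loop/join/encode pipeline by a single
-- left-to-right pass mapping each character of string.strip() to its regex piece (objective: simpler).

-- ===== PORT A =====
-- the characters of the raw string r'\|()[]/<>_-'
def pySpecials : List Char := ['\\', '|', '(', ')', '[', ']', '/', '<', '>', '_', '-']

def patterfy_py (string : String) : String :=
  let s := PySem.Str.strip string
  -- string.split('.') with the per-part replace loop; splitOn is the sep ≠ "" form of split
  let split_litdot := (PySem.Chars.splitOn s.toList ['.']).map (fun part =>
    pySpecials.foldl (fun part ch => PySem.Chars.replace part [ch] ['.']) part)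
  let joined := PySem.Chars.join ['\\', '.'] split_litdot
  -- encode('ascii','replace').decode(): hand-port, exact per code point (every code point > 127 becomes '?')
  let asciistring := joined.map (fun c => if 127 < c.toNat then '?' else c)
  String.mk (PySem.Chars.replace asciistring ['?'] ['[', 'a', '-', 'z', ']'])

-- ===== PORT B =====
def altPiece (c : Char) : List Char :=
  if c = '.' then ['\\', '.']
  else if c ∈ (['\\', '|', '(', ')', '[', ']', '/', '<', '>', '_', '-'] : List Char) then ['.']
  else if c = '?' ∨ 127 < c.toNat then ['[', 'a', '-', 'z', ']']
  else [c]

def patterfy_py_alt (string : String) : String :=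
  String.mk ((PySem.Str.strip string).toList.flatMap altPiece)

-- ===== PRECONDITION & SPEC =====
def Spec_patterfy_py (string : String) (out : String) : Prop := out = patterfy_py_alt string
instance (string : String) (out : String) : Decidable (Spec_patterfy_py string out) := by unfold Spec_patterfy_py; infer_instance

-- ===== CLAIM (what is proved, stated in full; the proofs are below) =====
def Claim_equal_patterfy_py : Prop := ∀ (string : String), Dom_patterfy_py string → Spec_patterfy_py string (patterfy_py string)

-- ===== LEMMAS AND PROOFS =====

-- replace with a single-character pattern is a per-character expansion
theorem replace_go_single (a : Char) (new : List Char) :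
    ∀ (fuel : Nat) (s acc : List Char), s.length ≤ fuel →
      PySem.Chars.replace.go [a] new fuel s acc
        = acc.reverse ++ s.flatMap (fun c => if c = a then new else [c]) := by
  intro fuel
  induction fuel with
  | zero =>
    intro s acc h
    cases s with
    | nil => simp [PySem.Chars.replace.go]
    | cons c t => simp at h
  | succ n ih =>
    intro s acc h
    cases s with
    | nil => simp [PySem.Chars.replace.go]
    | cons c t =>
      simp only [PySem.Chars.replace.go]
      by_cases hc : c = a
      · subst hc
        rw [if_pos (by simp [List.isPrefixOf])]
        simp only [List.length_cons] at h
        rw [ih _ _ (by simpa using h)]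
        simp
      · rw [if_neg (by simp [List.isPrefixOf]; exact fun h' => hc h'.symm)]
        simp only [List.length_cons] at h
        rw [ih _ _ (by omega)]
        simp [hc]

theorem replace_single (a : Char) (new s : List Char) :
    PySem.Chars.replace s [a] new = s.flatMap (fun c => if c = a then new else [c]) := by
  simp only [PySem.Chars.replace, List.isEmpty_cons, Bool.false_eq_true, if_false]
  simpa using replace_go_single a new s.length s [] le_rfl

-- structural form of split on a single-character separator
def splitA (a : Char) : List Char → List (List Char)
  | [] => [[]]
  | c :: t =>
    if c = a then [] :: splitA a t
    else
      match splitA a t with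
      | [] => [[c]]
      | p :: ps => (c :: p) :: ps

theorem splitA_ne_nil (a : Char) (s : List Char) : splitA a s ≠ [] := by
  cases s with
  | nil => simp [splitA]
  | cons c t =>
    simp only [splitA]
    split
    · simp
    · split <;> simp

theorem splitOn_go_single (a : Char) :
    ∀ (fuel : Nat) (s cur : List Char) (acc : List (List Char)), s.length ≤ fuel →
      PySem.Chars.splitOn.go [a] fuel s cur acc
        = acc.reverse ++ (cur.reverse ++ (splitA a s).headI) :: (splitA a s).tail := by
  intro fuel
  induction fuel with
  | zero =>
    intro s cur acc h
    cases s with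
    | nil => simp [PySem.Chars.splitOn.go, splitA]
    | cons c t => simp at h
  | succ n ih =>
    intro s cur acc h
    cases s with
    | nil => simp [PySem.Chars.splitOn.go, splitA]
    | cons c t =>
      simp only [PySem.Chars.splitOn.go]
      by_cases hc : c = a
      · subst hc
        rw [if_pos (by simp [List.isPrefixOf])]
        simp only [List.length_cons] at h
        rw [ih _ _ _ (by simpa using h)]
        obtain ⟨p, ps, hps⟩ := List.exists_cons_of_ne_nil (splitA_ne_nil c t)
        simp [splitA, hps]
      · rw [if_neg (by simp [List.isPrefixOf]; exact fun h' => hc h'.symm)]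
        simp only [List.length_cons] at h
        rw [ih _ _ _ (by omega)]
        obtain ⟨p, ps, hps⟩ := List.exists_cons_of_ne_nil (splitA_ne_nil a t)
        simp [splitA, hc, hps]

theorem splitOn_single (a : Char) (s : List Char) :
    PySem.Chars.splitOn s [a] = splitA a s := by
  simp only [PySem.Chars.splitOn]
  rw [splitOn_go_single a (s.length + 1) s [] [] (by omega)]
  obtain ⟨p, ps, hps⟩ := List.exists_cons_of_ne_nil (splitA_ne_nil a s)
  simp [hps]

theorem intercalate_cons_append (sep x y : List Char) (zs : List (List Char)) :
    List.intercalate sep ((x ++ y) :: zs) = x ++ List.intercalate sep (y :: zs) := by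
  cases zs <;> simp [List.intercalate, List.intersperse]

theorem intercalate_nil_cons (sep z : List Char) (zs : List (List Char)) :
    List.intercalate sep ([] :: z :: zs) = sep ++ List.intercalate sep (z :: zs) := by
  simp [List.intercalate, List.intersperse]

-- joining the mapped pieces of a single-character split is a per-character expansion
theorem join_map_splitA (sep : List Char) (m : Char → Char) (a : Char) (s : List Char) :
    PySem.Chars.join sep ((splitA a s).map (List.map m))
      = s.flatMap (fun c => if c = a then sep else [m c]) := by
  induction s with
  | nil => simp [splitA, PySem.Chars.join, List.intercalate]
  | cons c t ih =>
    obtain ⟨p, ps, hps⟩ := List.exists_cons_of_ne_nil (splitA_ne_nil a t)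
    rw [hps] at ih
    simp only [List.map_cons, PySem.Chars.join] at ih
    by_cases hc : c = a
    · have hsplit : splitA a (c :: t) = [] :: p :: ps := by simp [splitA, hc, hps]
      rw [hsplit]
      simp only [List.map_cons, List.map_nil, PySem.Chars.join]
      rw [intercalate_nil_cons, ih]
      simp [hc]
    · have hsplit : splitA a (c :: t) = (c :: p) :: ps := by simp [splitA, hc, hps]
      rw [hsplit]
      simp only [List.map_cons, PySem.Chars.join]
      rw [show (m c :: List.map m p : List Char) = [m c] ++ List.map m p from rfl,
        intercalate_cons_append, ih]
      simp [hc]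

theorem flatMap_ite_singleton (a b : Char) (l : List Char) :
    l.flatMap (fun c => if c = a then [b] else [c]) = l.map (fun c => if c = a then b else c) := by
  rw [show (fun c : Char => if c = a then [b] else [c])
      = fun c : Char => [if c = a then b else c] from funext fun c => by split <;> rfl]
  exact Eq.symm List.map_eq_flatMap

-- A's inner replace loop substitutes '.' for every character of the list it folds over
theorem foldl_replace_gen (L : List Char) (hL : ('.' : Char) ∉ L) : ∀ p : List Char,
    L.foldl (fun part ch => PySem.Chars.replace part [ch] ['.']) p
      = p.map (fun c => if c ∈ L then '.' else c) := by
  induction L with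
  | nil => intro p; simp
  | cons a L' ih =>
    intro p
    have hdot : ('.' : Char) ∉ L' := fun h => hL (List.mem_cons_of_mem _ h)
    simp only [List.foldl_cons]
    rw [replace_single, flatMap_ite_singleton, ih hdot, List.map_map]
    refine List.map_congr_left fun c _ => ?_
    simp only [Function.comp_apply, List.mem_cons]
    by_cases hca : c = a
    · subst hca; simp [hdot]
    · simp [hca]

theorem foldl_replace_eq_map (p : List Char) :
    pySpecials.foldl (fun part ch => PySem.Chars.replace part [ch] ['.']) p
      = p.map (fun c => if c ∈ pySpecials then '.' else c) :=
  foldl_replace_gen pySpecials (by decide) p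

-- per-character agreement of A's pipeline with B's piece function
theorem piece_eq (c : Char) :
    ((if c = '.' then (['\\', '.'] : List Char)
        else [if c ∈ pySpecials then '.' else c]).map
        (fun d => if 127 < d.toNat then '?' else d)).flatMap
      (fun d => if d = '?' then (['[', 'a', '-', 'z', ']'] : List Char) else [d])
      = altPiece c := by
  by_cases hd : c = '.'
  · subst hd; decide
  rw [if_neg hd]
  unfold altPiece pySpecials
  rw [if_neg hd]
  by_cases hm : c ∈ (['\\', '|', '(', ')', '[', ']', '/', '<', '>', '_', '-'] : List Char)
  · rw [if_pos hm, if_pos hm]; decide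
  rw [if_neg hm, if_neg hm]
  by_cases h127 : 127 < c.toNat
  · rw [if_pos (Or.inr h127)]; simp [h127]
  by_cases hq : c = '?'
  · subst hq; decide
  rw [if_neg (by simp [hq, h127])]
  simp [h127, hq]

theorem patterfy_py_spec : Claim_equal_patterfy_py := by
  intro string _
  unfold Spec_patterfy_py patterfy_py patterfy_py_alt
  simp only [splitOn_single, foldl_replace_eq_map]
  rw [join_map_splitA, replace_single, List.map_flatMap, List.flatMap_assoc]
  simp only [piece_eq]
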